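-- pv_equiv track=rewrite | github.com/debrikosar/prices_task | calculations.py | generate_unique_shop_items_list
-- ===== SOURCE A (Python) =====
-- def generate_unique_shops_list(data):
--     shop_id_column_index = 1
--     shop_id_list = []
--
--     for line in data:
--         if not line[shop_id_column_index] in shop_id_list:
--             shop_id_list.append(line[shop_id_column_index])
--
--     return shop_id_list
--
-- def generate_empty_unique_shop_items_list(data):
--     return {shop_key: [] for shop_key in generate_unique_shops_list(data)}
--
-- def generate_unique_shop_items_list(data):
--     item_id_column_index = 0
--     store_id_column_index = 1
--     empty_unique_shop_items = generate_empty_unique_shop_items_list(data)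
--     unique_shop_items = empty_unique_shop_items
--
--     for line in data:
--         if not line[item_id_column_index] in empty_unique_shop_items[line[store_id_column_index]]:
--             unique_shop_items[line[store_id_column_index]].append(line[item_id_column_index])
--
--     return unique_shop_items
-- ===== SOURCE B (Python) =====
-- def generate_unique_shop_items_list(data):
--     result = {}
--     for line in data:
--         items = result.setdefault(line[1], [])
--         if line[0] not in items:
--             items.append(line[0])
--     return result
-- ===== Notes on version B (the rewrite author's own statement) =====
-- stated objective: simpler
-- what changed: Replaces A's three passes (collect ordered shop ids, build an empty dict, populate it) with a single traversal maintaining one dict via setdefault; first-appearance order of shops and items is preserved by dict insertion order.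
import Mathlib
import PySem

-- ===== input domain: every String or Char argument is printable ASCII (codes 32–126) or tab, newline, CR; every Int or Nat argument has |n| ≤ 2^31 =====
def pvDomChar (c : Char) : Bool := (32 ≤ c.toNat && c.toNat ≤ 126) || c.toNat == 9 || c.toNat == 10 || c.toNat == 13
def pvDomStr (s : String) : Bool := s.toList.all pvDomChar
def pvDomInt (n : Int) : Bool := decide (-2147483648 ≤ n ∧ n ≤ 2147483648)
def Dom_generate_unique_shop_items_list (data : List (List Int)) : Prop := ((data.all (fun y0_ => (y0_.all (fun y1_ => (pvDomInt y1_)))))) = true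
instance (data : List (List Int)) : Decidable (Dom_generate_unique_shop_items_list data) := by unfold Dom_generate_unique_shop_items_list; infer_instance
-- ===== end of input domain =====

-- B merges A's three passes (ordered shop list, empty dict, populate) into one
-- setdefault-based traversal of data (objective: simpler).

-- ===== PORT A =====
def generate_unique_shops_list (data : List (List Int)) : List Int :=
  data.foldl (fun acc l =>
    if PySem.List.pyGetD l 1 0 ∈ acc then acc else acc ++ [PySem.List.pyGetD l 1 0]) []

def generate_empty_unique_shop_items_list (data : List (List Int)) : PySem.Dict Int (List Int) :=
  (generate_unique_shops_list data).foldl (fun d k => d.insert k []) PySem.Dict.empty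

def generate_unique_shop_items_list (data : List (List Int)) : List (Int × List Int) :=
  (data.foldl (fun d l =>
      if PySem.List.pyGetD l 0 0 ∈ d.getD (PySem.List.pyGetD l 1 0) [] then d
      else d.modify (PySem.List.pyGetD l 1 0) [] (· ++ [PySem.List.pyGetD l 0 0]))
    (generate_empty_unique_shop_items_list data)).items

-- ===== PORT B =====
def generate_unique_shop_items_list_alt (data : List (List Int)) : List (Int × List Int) :=
  (data.foldl (fun d l =>
      let d' := d.setdefault (PySem.List.pyGetD l 1 0) ([] : List Int)
      if PySem.List.pyGetD l 0 0 ∈ d'.getD (PySem.List.pyGetD l 1 0) [] then d'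
      else d'.modify (PySem.List.pyGetD l 1 0) [] (· ++ [PySem.List.pyGetD l 0 0]))
    PySem.Dict.empty).items

-- ===== PRECONDITION & SPEC =====
-- Pre_ excludes exactly the inputs where Python A raises IndexError: a line shorter than 2.
def Pre_generate_unique_shop_items_list (data : List (List Int)) : Prop :=
  ∀ l ∈ data, 2 ≤ l.length
instance (data : List (List Int)) : Decidable (Pre_generate_unique_shop_items_list data) := by
  unfold Pre_generate_unique_shop_items_list; infer_instance

def pvWitness_generate_unique_shop_items_list : List (List Int) := [[1, 10], [2, 10], [1, 10], [3, 20]]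

def Spec_generate_unique_shop_items_list (data : List (List Int)) (out : List (Int × List Int)) : Prop := out = generate_unique_shop_items_list_alt data
instance (data : List (List Int)) (out : List (Int × List Int)) : Decidable (Spec_generate_unique_shop_items_list data out) := by unfold Spec_generate_unique_shop_items_list; infer_instance

-- ===== CLAIM (what is proved, stated in full; the proofs are below) =====
def Claim_equal_generate_unique_shop_items_list : Prop := ∀ (data : List (List Int)), Dom_generate_unique_shop_items_list data → Pre_generate_unique_shop_items_list data → Spec_generate_unique_shop_items_list data (generate_unique_shop_items_list data)

-- ===== LEMMAS AND PROOFS =====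

def pvS (l : List Int) : Int := PySem.List.pyGetD l 1 0
def pvI (l : List Int) : Int := PySem.List.pyGetD l 0 0

def pvStepA (d : PySem.Dict Int (List Int)) (l : List Int) : PySem.Dict Int (List Int) :=
  if pvI l ∈ d.getD (pvS l) [] then d
  else d.modify (pvS l) [] (· ++ [pvI l])

def pvStepB (d : PySem.Dict Int (List Int)) (l : List Int) : PySem.Dict Int (List Int) :=
  pvStepA (d.setdefault (pvS l) []) l

lemma pvA_eq (data : List (List Int)) :
    generate_unique_shop_items_list data
      = (data.foldl pvStepA (generate_empty_unique_shop_items_list data)).items := rfl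

lemma pvB_eq (data : List (List Int)) :
    generate_unique_shop_items_list_alt data
      = (data.foldl pvStepB PySem.Dict.empty).items := rfl

lemma pvShops_eq (data : List (List Int)) :
    generate_unique_shops_list data = PySem.Set.ofList (data.map pvS) := by
  have : generate_unique_shops_list data
      = data.foldl (fun s l => PySem.Set.add s (pvS l)) [] := by
    unfold generate_unique_shops_list
    congr 1
    funext acc l
    simp [PySem.Set.add_eq_ite, pvS]
  rw [this, ← PySem.Set.update_map_eq_foldl_add, PySem.Set.update_nil_left]

lemma pvGetD_setdefault (d : PySem.Dict Int (List Int)) (s k : Int) :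
    (d.setdefault s ([] : List Int)).getD k [] = d.getD k [] := by
  cases h : d.contains s with
  | true => rw [PySem.Dict.setdefault_of_contains _ _ h]
  | false =>
    rw [PySem.Dict.setdefault_of_not_contains _ _ h, PySem.Dict.getD_insert]
    split_ifs with hk
    · subst hk; rw [PySem.Dict.getD_of_not_contains _ _ h]
    · rfl

lemma pvGetD_stepA (d : PySem.Dict Int (List Int)) (l : List Int) (k : Int) :
    (pvStepA d l).getD k []
      = if k = pvS l then
          (if pvI l ∈ d.getD (pvS l) [] then d.getD (pvS l) []
           else d.getD (pvS l) [] ++ [pvI l])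
        else d.getD k [] := by
  unfold pvStepA
  split_ifs with h1 h2 <;> simp_all [PySem.Dict.getD_modify]

lemma pvGetD_fold_congr (rest : List (List Int)) (d e : PySem.Dict Int (List Int))
    (h : ∀ k, d.getD k [] = e.getD k []) :
    ∀ k, (rest.foldl pvStepA d).getD k [] = (rest.foldl pvStepB e).getD k [] := by
  induction rest generalizing d e with
  | nil => simpa using h
  | cons l rest ih =>
    intro k
    simp only [List.foldl_cons]
    apply ih
    intro k'
    show (pvStepA d l).getD k' [] = (pvStepA (e.setdefault (pvS l) []) l).getD k' []
    rw [pvGetD_stepA, pvGetD_stepA, pvGetD_setdefault, pvGetD_setdefault, h (pvS l)]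
    split_ifs <;> simp [h k']

lemma pvKeys_stepA (d : PySem.Dict Int (List Int)) (l : List Int)
    (h : pvS l ∈ d.keys) : (pvStepA d l).keys = d.keys := by
  unfold pvStepA
  split_ifs
  · rfl
  · rw [PySem.Dict.keys_modify, PySem.Dict.keys_insert_of_contains]
    rw [PySem.Dict.contains_eq_decide_mem_keys]
    simpa using h

lemma pvKeys_stepB (d : PySem.Dict Int (List Int)) (l : List Int) :
    (pvStepB d l).keys = PySem.Set.add d.keys (pvS l) := by
  unfold pvStepB
  cases h : d.contains (pvS l) with
  | true =>
    have hm : pvS l ∈ d.keys := by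
      rw [PySem.Dict.contains_eq_decide_mem_keys] at h; simpa using h
    rw [PySem.Dict.setdefault_of_contains _ _ h, pvKeys_stepA d l hm,
      PySem.Set.add_of_mem hm]
  | false =>
    have hm : pvS l ∉ d.keys := by
      rw [PySem.Dict.contains_eq_decide_mem_keys] at h; simpa using h
    rw [PySem.Dict.setdefault_of_not_contains _ _ h]
    rw [pvKeys_stepA, PySem.Dict.keys_insert_of_not_contains _ _ h,
      PySem.Set.add_of_not_mem hm]
    rw [PySem.Dict.keys_insert_of_not_contains _ _ h]
    simp

lemma pvKeys_foldB (rest : List (List Int)) (d : PySem.Dict Int (List Int)) :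
    (rest.foldl pvStepB d).keys = PySem.Set.update d.keys (rest.map pvS) := by
  induction rest generalizing d with
  | nil => simp [PySem.Set.update_nil]
  | cons l rest ih =>
    simp only [List.foldl_cons, List.map_cons, PySem.Set.update_cons]
    rw [ih, pvKeys_stepB]

lemma pvKeys_foldA (rest : List (List Int)) (d : PySem.Dict Int (List Int))
    (h : ∀ l ∈ rest, pvS l ∈ d.keys) : (rest.foldl pvStepA d).keys = d.keys := by
  induction rest generalizing d with
  | nil => rfl
  | cons l rest ih =>
    simp only [List.foldl_cons]
    rw [ih, pvKeys_stepA d l (h l (by simp))]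
    intro l' hl'
    rw [pvKeys_stepA d l (h l (by simp))]
    exact h l' (by simp [hl'])

lemma pvGetD_empty_fold (ks : List Int) (d : PySem.Dict Int (List Int))
    (h : ∀ k, d.getD k [] = []) :
    ∀ k, (ks.foldl (fun d s => d.insert s []) d).getD k [] = [] := by
  induction ks generalizing d with
  | nil => simpa using h
  | cons s ks ih =>
    simp only [List.foldl_cons]
    apply ih
    intro k
    rw [PySem.Dict.getD_insert]
    split_ifs
    · rfl
    · exact h k

lemma pvKeys_d0 (data : List (List Int)) :
    (generate_empty_unique_shop_items_list data).keys = generate_unique_shops_list data := by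
  unfold generate_empty_unique_shop_items_list
  rw [PySem.Dict.keys_foldl_insert (f := fun _ _ => ([] : List Int))]
  rw [PySem.Dict.keys_empty, PySem.Set.update_nil_left, pvShops_eq,
    PySem.Set.ofList_ofList]

-- ===== VERDICT (by name: the statement is the Claim_ definition above) =====
theorem generate_unique_shop_items_list_spec : Claim_equal_generate_unique_shop_items_list := by
  intro data _ _
  unfold Spec_generate_unique_shop_items_list
  rw [pvA_eq, pvB_eq]
  have hshops_nodup : (generate_unique_shops_list data).Nodup := by
    rw [pvShops_eq]; exact PySem.Set.nodup_ofList _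
  have hkA : (data.foldl pvStepA (generate_empty_unique_shop_items_list data)).keys
      = generate_unique_shops_list data := by
    rw [pvKeys_foldA, pvKeys_d0]
    intro l hl
    rw [pvKeys_d0, pvShops_eq, PySem.Set.mem_ofList]
    exact List.mem_map_of_mem hl
  have hkB : (data.foldl pvStepB PySem.Dict.empty).keys
      = generate_unique_shops_list data := by
    rw [pvKeys_foldB, PySem.Dict.keys_empty, PySem.Set.update_nil_left, pvShops_eq]
  rw [PySem.Dict.items_eq_map_keys _ (by rw [hkA]; exact hshops_nodup) ([] : List Int),
    PySem.Dict.items_eq_map_keys _ (by rw [hkB]; exact hshops_nodup) ([] : List Int),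
    hkA, hkB]
  apply List.map_congr_left
  intro k _
  have := pvGetD_fold_congr data (generate_empty_unique_shop_items_list data)
    PySem.Dict.empty (fun k => by
      rw [PySem.Dict.getD_empty]
      exact pvGetD_empty_fold (generate_unique_shops_list data) PySem.Dict.empty
        (fun k => PySem.Dict.getD_empty _ _) k)
  rw [this k]
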